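/- GENERATED by c/gen_decode.py: decode facts of the image, one per distinct instruction byte string. -/
import UserX.DecodeImage

#decode_all Vorbis.Dec
  "0f2fc1"  -- comiss xmm0,xmm1
  "0f848ef9ffff"  -- je 113b22
  "0f8547010000"  -- jne 114439
  "0f8cd4feffff"  -- jl 10bc82
  "0f9cc0"  -- setl al
  "0fb74500"  -- movzx eax,WORD PTR [rbp+0x0]
  "3b03"  -- cmp eax,DWORD PTR [rbx]
  "410fb65e1b"  -- movzx ebx,BYTE PTR [r14+0x1b]
  "41807d1b00"  -- cmp BYTE PTR [r13+0x1b],0x0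
  "41898424e8060000"  -- mov DWORD PTR [r12+0x6e8],eax
  "418b9ef4060000"  -- mov ebx,DWORD PTR [r14+0x6f4]
  "41d1ff"  -- sar r15d,1
  "440fb6e0"  -- movzx r12d,al
  "443ba5d0010000"  -- cmp r12d,DWORD PTR [rbp+0x1d0]
  "44898538ffffff"  -- mov DWORD PTR [rbp-0xc8],r8d
  "448b4da8"  -- mov r9d,DWORD PTR [rbp-0x58]
  "448bbb9c000000"  -- mov r15d,DWORD PTR [rbx+0x9c]
  "4585ed"  -- test r13d,r13d
  "458b7424fc"  -- mov r14d,DWORD PTR [r12-0x4]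
  "4803ab30080000"  -- add rbp,QWORD PTR [rbx+0x830]
  "4863d2"  -- movsxd rdx,edx
  "4883c428"  -- add rsp,0x28
  "4889542420"  -- mov QWORD PTR [rsp+0x20],rdx
  "488b0c24"  -- mov rcx,QWORD PTR [rsp]
  "488b83a8050000"  -- mov rax,QWORD PTR [rbx+0x5a8]
  "488d4504"  -- lea rax,[rbp+0x4]
  "488d7bec"  -- lea rdi,[rbx-0x14]
  "488dba84000000"  -- lea rdi,[rdx+0x84]
  "488dbceb68040000"  -- lea rdi,[rbx+rbp*8+0x468]
  "48c1e903"  -- shr rcx,0x3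
  "49035c2418"  -- add rbx,QWORD PTR [r12+0x18]
  "4983c601"  -- add r14,0x1
  "498d2c47"  -- lea rbp,[r15+rax*2]
  "498d7f04"  -- lea rdi,[r15+0x4]
  "49c7860000c00000000000"  -- mov QWORD PTR [r14+0xc00000],0x0
  "4b8d3c74"  -- lea rdi,[r12+r14*2]
  "4c89442410"  -- mov QWORD PTR [rsp+0x10],r8
  "4c8b6370"  -- mov r12,QWORD PTR [rbx+0x70]
  "4c8d34c500000000"  -- lea r14,[rax*8+0x0]
  "4d63f5"  -- movsxd r14,r13d
  "4e896cf308"  -- mov QWORD PTR [rbx+r14*8+0x8],r13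
  "660f6ed5"  -- movd xmm2,ebp
  "6641891f"  -- mov WORD PTR [r15],bx
  "72e7"  -- jb 101538
  "745f"  -- je 103640
  "7574"  -- jne 1132df
  "7c52"  -- jl 108bab
  "7ea5"  -- jle 11451e
  "81e1ffff1f00"  -- and ecx,0x1fffff
  "83e007"  -- and eax,0x7
  "89442444"  -- mov DWORD PTR [rsp+0x44],eax
  "899510ffffff"  -- mov DWORD PTR [rbp-0xf0],edx
  "8b442428"  -- mov eax,DWORD PTR [rsp+0x28]
  "8b7c244c"  -- mov edi,DWORD PTR [rsp+0x4c]
  "8d4108"  -- lea eax,[rcx+0x8]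
  "be08000000"  -- mov esi,0x8
  "c6870000c00000"  -- mov BYTE PTR [rdi+0xc00000],0x0
  "c783dc06000000000000"  -- mov DWORD PTR [rbx+0x6dc],0x0
  "e804eafeff"  -- call 100300
  "e80e69ffff"  -- call 100720
  "e81891ffff"  -- call 100800
  "e82219ffff"  -- call 100640
  "e82bb5ffff"  -- call 100640
  "e83470feff"  -- call 100800
  "e83faffeff"  -- call 1003c0
  "e84970ffff"  -- call 102dc0
  "e8557cffff"  -- call 10d1c0
  "e86260ffff"  -- call 103d00
  "e86dd0feff"  -- call 100300
  "e87901ffff"  -- call 103d00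
  "e883e6ffff"  -- call 10dbc0
  "e88ef4feff"  -- call 100800
  "e898a7feff"  -- call 100720
  "e8a255ffff"  -- call 100800
  "e8adeffeff"  -- call 103d00
  "e8b6b6feff"  -- call 100640
  "e8c18effff"  -- call 100640
  "e8ca93ffff"  -- call 100640
  "e8d594ffff"  -- call 100640
  "e8dfccffff"  -- call 108f20
  "e8e862ffff"  -- call 10b100
  "e8f084ffff"  -- call 10d1c0
  "e8fbfbffff"  -- call 107500
  "e92bf0ffff"  -- jmp 113b22
  "e972f9ffff"  -- jmp 11526a
  "e9cb010000"  -- jmp 115057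
  "eb26"  -- jmp 101484
  "ebb4"  -- jmp 10d775
  "f20f1015b7d90100"  -- movsd xmm2,QWORD PTR [rip+0x1d9b7]
  "f20f59350cdb0100"  -- mulsd xmm6,QWORD PTR [rip+0x1db0c]
  "f30f100d0b980100"  -- movss xmm1,DWORD PTR [rip+0x1980b]
  "f30f1063f0"  -- movss xmm4,DWORD PTR [rbx-0x10]
  "f30f1143cc"  -- movss DWORD PTR [rbx-0x34],xmm0
  "f30f11642408"  -- movss DWORD PTR [rsp+0x8],xmm4
  "f30f58442408"  -- addss xmm0,DWORD PTR [rsp+0x8]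
  "f30f594dc0"  -- mulss xmm1,DWORD PTR [rbp-0x40]
  "f30f5cd4"  -- subss xmm2,xmm4
  "f3410f114424e4"  -- movss DWORD PTR [r12-0x1c],xmm0
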